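-- pv_equiv track=rewrite | github.com/techupskills/ai-app3 | extra/lab4-rag_enhanced_agent.py | _analyze_query_for_knowledge_needs
-- ===== SOURCE A (Python) =====
-- def _analyze_query_for_knowledge_needs(query: str) -> bool:
--     """Analyze if query would benefit from knowledge base search"""
--
--     # Keywords that indicate knowledge base relevance
--     knowledge_keywords = [
--         'policy', 'procedure', 'how to', 'instructions', 'steps',
--         'documentation', 'guide', 'manual', 'requirements',
--         'return', 'refund', 'billing', 'payment', 'API',
--         'integration', 'setup', 'configuration', 'troubleshooting'
--     ]
--
--     query_lower = query.lower()
--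
--     # Check for knowledge-relevant keywords
--     for keyword in knowledge_keywords:
--         if keyword in query_lower:
--             return True
--
--     # Check for question patterns that suggest information retrieval
--     question_patterns = [
--         'what is', 'how do', 'how can', 'where is', 'when does',
--         'what are the steps', 'how to', 'what\'s the process'
--     ]
--
--     for pattern in question_patterns:
--         if pattern in query_lower:
--             return True
--
--     return False
-- ===== SOURCE B (Python) =====
-- # Hash-set lookup of fixed-length windows: slice every window whose length is a
-- # possible keyword length out of the lowercased query and test it against a
-- # frozenset, instead of one substring scan per keyword.
-- _KB_KEYWORDS = frozenset([
--     'policy', 'procedure', 'how to', 'instructions', 'steps',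
--     'documentation', 'guide', 'manual', 'requirements',
--     'return', 'refund', 'billing', 'payment', 'API',
--     'integration', 'setup', 'configuration', 'troubleshooting',
--     'what is', 'how do', 'how can', 'where is', 'when does',
--     'what are the steps', "what's the process"
-- ])
-- _KB_LENGTHS = sorted({len(k) for k in _KB_KEYWORDS})
--
-- def _analyze_query_for_knowledge_needs(query: str) -> bool:
--     q = query.lower()
--     n = len(q)
--     return any(q[i:i + m] in _KB_KEYWORDS
--                for m in _KB_LENGTHS
--                for i in range(n - m + 1))
-- ===== Notes on version B (the rewrite author's own statement) =====
-- stated objective: alternative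
-- what changed: Replaces A's ~26 per-keyword substring scans with a hash index: the merged keywords go into a frozenset and every window of the lowercased query whose length is a possible keyword length is looked up in it.
import Mathlib
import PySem

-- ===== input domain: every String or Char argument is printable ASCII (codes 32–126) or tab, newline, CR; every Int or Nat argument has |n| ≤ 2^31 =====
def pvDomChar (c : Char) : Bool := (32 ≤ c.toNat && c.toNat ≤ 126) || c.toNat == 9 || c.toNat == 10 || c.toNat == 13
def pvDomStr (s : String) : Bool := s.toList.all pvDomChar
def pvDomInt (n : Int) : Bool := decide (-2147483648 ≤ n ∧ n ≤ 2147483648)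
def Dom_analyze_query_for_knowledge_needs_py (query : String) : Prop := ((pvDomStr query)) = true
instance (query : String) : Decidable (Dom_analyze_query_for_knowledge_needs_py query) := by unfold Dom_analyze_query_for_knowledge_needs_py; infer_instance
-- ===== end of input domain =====

-- B replaces A's ~26 per-keyword substring scans with a hash index: the merged
-- keywords go into a set, and every window of the lowercased query whose length is
-- a possible keyword length is looked up in it (objective: alternative; same cost).

-- ===== PORT A =====
def pvKnowledgeKeywords : List String := [
  "policy", "procedure", "how to", "instructions", "steps",
  "documentation", "guide", "manual", "requirements",
  "return", "refund", "billing", "payment", "API",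
  "integration", "setup", "configuration", "troubleshooting"]

def pvQuestionPatterns : List String := [
  "what is", "how do", "how can", "where is", "when does",
  "what are the steps", "how to", "what's the process"]

-- 'for kw in ks: if kw in q: return True' … falls through to False
def pvLoopA (ks : List String) (q : String) : Bool :=
  match ks with
  | [] => false
  | k :: rest => if PySem.Str.isIn k q then true else pvLoopA rest q

def analyze_query_for_knowledge_needs_py (query : String) : Bool :=
  let query_lower := PySem.Str.lower query
  if pvLoopA pvKnowledgeKeywords query_lower then true
  else if pvLoopA pvQuestionPatterns query_lower then true
  else false

-- ===== PORT B =====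
-- _KB_KEYWORDS = frozenset([...])
def pvKbSet : PySem.Set String := PySem.Set.ofList [
  "policy", "procedure", "how to", "instructions", "steps",
  "documentation", "guide", "manual", "requirements",
  "return", "refund", "billing", "payment", "API",
  "integration", "setup", "configuration", "troubleshooting",
  "what is", "how do", "how can", "where is", "when does",
  "what are the steps", "what's the process"]

-- _KB_LENGTHS = sorted({len(k) for k in _KB_KEYWORDS})
def pvKbLengths : List Int :=
  PySem.List.sorted (PySem.Set.ofList (pvKbSet.map (fun k => PySem.Str.len k))) (fun x => x) false

def analyze_query_for_knowledge_needs_py_alt (query : String) : Bool :=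
  let q := PySem.Str.lower query
  let n := PySem.Str.len q
  pvKbLengths.any (fun m =>
    (PySem.List.pyRange 0 (n - m + 1) 1).any (fun i =>
      pvKbSet.contains (PySem.Str.slice q (some i) (some (i + m)))))

-- ===== PRECONDITION & SPEC =====
def Spec_analyze_query_for_knowledge_needs_py (query : String) (out : Bool) : Prop := out = analyze_query_for_knowledge_needs_py_alt query
instance (query : String) (out : Bool) : Decidable (Spec_analyze_query_for_knowledge_needs_py query out) := by unfold Spec_analyze_query_for_knowledge_needs_py; infer_instance

-- ===== CLAIM (what is proved, stated in full; the proofs are below) =====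
def Claim_equal_analyze_query_for_knowledge_needs_py : Prop := ∀ (query : String), Dom_analyze_query_for_knowledge_needs_py query → Spec_analyze_query_for_knowledge_needs_py query (analyze_query_for_knowledge_needs_py query)

-- ===== LEMMAS AND PROOFS =====

-- A's keyword loop is the 'any' of the substring tests
theorem pvLoopA_eq_any (ks : List String) (q : String) :
    pvLoopA ks q = ks.any (fun k => PySem.Str.isIn k q) := by
  induction ks with
  | nil => rfl
  | cons k rest ih => simp [pvLoopA, ih]

theorem pv_ite_or (a b : Bool) :
    (if a = true then true else if b = true then true else false) = (a || b) := by
  cases a <;> cases b <;> rfl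

-- B's set holds exactly the keywords of A's two lists
theorem pvKbSet_mem_iff (k : String) :
    k ∈ pvKbSet ↔ (k ∈ pvKnowledgeKeywords ∨ k ∈ pvQuestionPatterns) := by
  rw [pvKbSet, PySem.Set.mem_ofList]
  simp only [pvKnowledgeKeywords, pvQuestionPatterns, List.mem_cons,
    List.not_mem_nil, or_false]
  tauto

-- every length of a keyword in the set is one of the candidate window lengths, and
-- all candidate lengths are positive (both closed computations)
theorem pvKbLengths_mem : ∀ k ∈ pvKbSet, ((k.toList.length : Int)) ∈ pvKbLengths := by decide

theorem pvKbLengths_pos : ∀ m ∈ pvKbLengths, 0 < m := by decide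

-- A is true iff some keyword of the set occurs as an infix of the lowercased query
theorem pvA_true_iff (q : String) :
    analyze_query_for_knowledge_needs_py q = true ↔
      ∃ k ∈ pvKbSet, k.toList <:+: (PySem.Str.lower q).toList := by
  show (if pvLoopA pvKnowledgeKeywords (PySem.Str.lower q) = true then true
        else if pvLoopA pvQuestionPatterns (PySem.Str.lower q) = true then true
        else false) = true ↔ _
  rw [pv_ite_or, Bool.or_eq_true, pvLoopA_eq_any, pvLoopA_eq_any]
  simp only [List.any_eq_true]
  constructor
  · rintro (⟨k, hk, hin⟩ | ⟨k, hk, hin⟩)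
    · exact ⟨k, (pvKbSet_mem_iff k).mpr (Or.inl hk), (PySem.Str.isIn_iff_infix k _).mp hin⟩
    · exact ⟨k, (pvKbSet_mem_iff k).mpr (Or.inr hk), (PySem.Str.isIn_iff_infix k _).mp hin⟩
  · rintro ⟨k, hk, hinf⟩
    have hin : PySem.Str.isIn k (PySem.Str.lower q) = true :=
      (PySem.Str.isIn_iff_infix k _).mpr hinf
    rcases (pvKbSet_mem_iff k).mp hk with hm | hm
    · exact Or.inl ⟨k, hm, hin⟩
    · exact Or.inr ⟨k, hm, hin⟩

-- B is true iff some keyword of the set occurs as an infix of the lowercased query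
theorem pvB_true_iff (query : String) :
    analyze_query_for_knowledge_needs_py_alt query = true ↔
      ∃ k ∈ pvKbSet, k.toList <:+: (PySem.Str.lower query).toList := by
  unfold analyze_query_for_knowledge_needs_py_alt
  set q := PySem.Str.lower query with hq
  simp only [List.any_eq_true, PySem.List.mem_pyRange_one]
  constructor
  · rintro ⟨m, hm, i, ⟨hi0, hilt⟩, hcont⟩
    have hmpos := pvKbLengths_pos m hm
    -- the window string is an element of the set
    have hmem : PySem.Str.slice q (some i) (some (i + m)) ∈ pvKbSet := by
      have := hcont
      unfold PySem.Set.contains at this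
      simpa using this
    refine ⟨_, hmem, ?_⟩
    rw [PySem.Str.toList_slice]
    have hsl : PySem.Chars.slice q.toList (some i) (some (i + m)) =
        List.take ((i + m).toNat - i.toNat) (List.drop i.toNat q.toList) :=
      PySem.List.slice_toNat q.toList hi0 (by omega)
    rw [hsl]
    exact ((List.take_prefix _ _).isInfix).trans (List.drop_suffix _ _).isInfix
  · rintro ⟨k, hk, hinf⟩
    obtain ⟨s, t, hst⟩ := hinf
    refine ⟨(k.toList.length : Int), pvKbLengths_mem k hk, (s.length : Int), ⟨by positivity, ?_⟩, ?_⟩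
    · have hlen : q.toList.length = s.length + k.toList.length + t.length := by
        rw [← hst]; simp [List.length_append]; omega
      have hklen : k.toList.length = k.length := by simp
      rw [PySem.Str.len_eq]
      omega
    · have hwin : PySem.Str.slice q (some (s.length : Int))
          (some ((s.length : Int) + (k.toList.length : Int))) = k := by
        apply String.toList_inj.mp
        rw [PySem.Str.toList_slice]
        have hsl : PySem.Chars.slice q.toList (some (s.length : Int))
            (some ((s.length : Int) + (k.toList.length : Int))) =
            List.take (((s.length : Int) + (k.toList.length : Int)).toNat -
              ((s.length : Int)).toNat) (List.drop ((s.length : Int)).toNat q.toList) :=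
          PySem.List.slice_toNat q.toList (by positivity) (by positivity)
        rw [hsl]
        have h1 : (((s.length : Int) + (k.toList.length : Int)).toNat -
            ((s.length : Int)).toNat) = k.toList.length := by omega
        have h2 : ((s.length : Int)).toNat = s.length := by omega
        rw [List.append_assoc] at hst
        rw [h1, h2, ← hst, List.drop_left, List.take_left]
      rw [hwin]
      unfold PySem.Set.contains
      simpa using hk

-- ===== VERDICT (by name: the statement is the Claim_ definition above) =====
theorem analyze_query_for_knowledge_needs_py_spec : Claim_equal_analyze_query_for_knowledge_needs_py := by
  intro query _
  unfold Spec_analyze_query_for_knowledge_needs_py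
  rw [Bool.eq_iff_iff, pvA_true_iff, pvB_true_iff]
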